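-- pv_equiv track=rewrite | github.com/zhouhang/financial-ai | finance-agents/data-agent/graphs/rule_generation/proc/rule_builder.py | _sources_with_primary_first
-- ===== SOURCE A (Python) =====
-- from typing import Any
--
-- def _sources_with_primary_first(
--     sources: list[dict[str, Any]],
--     primary_source: dict[str, Any],
-- ) -> list[dict[str, Any]]:
--     primary_table = _table_name(primary_source)
--     if not primary_table:
--         return list(sources)
--     primary_items: list[dict[str, Any]] = []
--     other_items: list[dict[str, Any]] = []
--     for source in sources:
--         if _table_name(source) == primary_table:
--             primary_items.append(source)
--         else:
--             other_items.append(source)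
--     return primary_items + other_items if primary_items else list(sources)
--
-- def _table_name(source: dict[str, Any]) -> str:
--     return str(
--         source.get("table_name")
--         or source.get("resource_key")
--         or source.get("dataset_code")
--         or source.get("dataset_name")
--         or source.get("source_id")
--         or ""
--     ).strip()
-- ===== SOURCE B (Python) =====
-- from typing import Any
--
-- def _sources_with_primary_first(
--     sources: list[dict[str, Any]],
--     primary_source: dict[str, Any],
-- ) -> list[dict[str, Any]]:
--     primary_table = _table_name(primary_source)
--     if not primary_table:
--         return list(sources)
--     return sorted(sources, key=lambda s: _table_name(s) != primary_table)
--
-- def _table_name(source: dict[str, Any]) -> str: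
--     return str(
--         source.get("table_name")
--         or source.get("resource_key")
--         or source.get("dataset_code")
--         or source.get("dataset_name")
--         or source.get("source_id")
--         or ""
--     ).strip()
-- ===== Notes on version B (the rewrite author's own statement) =====
-- stated objective: idiomatic
-- what changed: Replaces the explicit primary/other bucket lists, concatenation and empty-bucket fallback with a single stable sorted() on the boolean key _table_name(s) != primary_table, whose stability gives the same order (and the no-match case for free).
import Mathlib
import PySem

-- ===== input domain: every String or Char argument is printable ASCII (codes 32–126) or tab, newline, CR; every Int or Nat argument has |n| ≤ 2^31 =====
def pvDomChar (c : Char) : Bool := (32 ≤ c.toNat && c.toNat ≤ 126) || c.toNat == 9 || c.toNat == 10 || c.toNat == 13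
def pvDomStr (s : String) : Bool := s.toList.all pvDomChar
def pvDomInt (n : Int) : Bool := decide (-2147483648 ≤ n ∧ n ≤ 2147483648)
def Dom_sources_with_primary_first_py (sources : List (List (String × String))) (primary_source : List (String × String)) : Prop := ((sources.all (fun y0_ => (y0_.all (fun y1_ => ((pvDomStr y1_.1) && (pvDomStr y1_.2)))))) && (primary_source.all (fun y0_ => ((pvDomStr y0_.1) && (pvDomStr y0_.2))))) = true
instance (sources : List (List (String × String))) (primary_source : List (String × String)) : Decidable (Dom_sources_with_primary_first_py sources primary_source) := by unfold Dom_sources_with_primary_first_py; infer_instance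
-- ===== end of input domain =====

-- B replaces A's explicit primary/other buckets and concatenation with one stable sort on a
-- boolean key (objective: idiomatic; same behaviour, stability of sorted carries the proof).

-- ===== PORT A =====
-- `x or y` on an optional string: y when x is None or "" (Python truthiness)
def pyOrStr (a : Option String) (b : String) : String :=
  match a with
  | some s => if s = "" then b else s
  | none => b

-- shared module helper _table_name (str() of a str is the identity)
def table_name_py (source : List (String × String)) : String :=
  PySem.Str.strip
    (pyOrStr ((PySem.Dict.mk source).get? "table_name")
      (pyOrStr ((PySem.Dict.mk source).get? "resource_key")
        (pyOrStr ((PySem.Dict.mk source).get? "dataset_code")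
          (pyOrStr ((PySem.Dict.mk source).get? "dataset_name")
            (pyOrStr ((PySem.Dict.mk source).get? "source_id") "")))))

def sources_with_primary_first_py (sources : List (List (String × String))) (primary_source : List (String × String)) : List (List (String × String)) :=
  let primary_table := table_name_py primary_source
  if primary_table = "" then sources
  else
    let acc := sources.foldl
      (fun (acc : List (List (String × String)) × List (List (String × String))) source =>
        if table_name_py source = primary_table then (acc.1 ++ [source], acc.2)
        else (acc.1, acc.2 ++ [source]))
      ([], [])
    if acc.1 = [] then sources else acc.1 ++ acc.2

-- ===== PORT B =====
def sources_with_primary_first_py_alt (sources : List (List (String × String))) (primary_source : List (String × String)) : List (List (String × String)) :=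
  let primary_table := table_name_py primary_source
  if primary_table = "" then sources
  else PySem.List.sorted sources (fun s => decide (table_name_py s ≠ primary_table)) false

-- ===== PRECONDITION & SPEC =====
def Spec_sources_with_primary_first_py (sources : List (List (String × String))) (primary_source : List (String × String)) (out : List (List (String × String))) : Prop := out = sources_with_primary_first_py_alt sources primary_source
instance (sources : List (List (String × String))) (primary_source : List (String × String)) (out : List (List (String × String))) : Decidable (Spec_sources_with_primary_first_py sources primary_source out) := by unfold Spec_sources_with_primary_first_py; infer_instance

-- ===== CLAIM (what is proved, stated in full; the proofs are below) =====
def Claim_equal_sources_with_primary_first_py : Prop := ∀ (sources : List (List (String × String))) (primary_source : List (String × String)), Dom_sources_with_primary_first_py sources primary_source → Spec_sources_with_primary_first_py sources primary_source (sources_with_primary_first_py sources primary_source)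

-- ===== LEMMAS AND PROOFS =====

-- insertBy puts x after a prefix it does not go before and before the first element it does
theorem insertBy_split {α : Type} (before : α → α → Bool) (x : α) (F T : List α)
    (hF : ∀ y ∈ F, before x y = false)
    (hT : ∀ t ts, T = t :: ts → before x t = true) :
    PySem.List.insertBy before x (F ++ T) = F ++ x :: T := by
  induction F with
  | nil =>
    cases T with
    | nil => simp [PySem.List.insertBy]
    | cons t ts => simp [PySem.List.insertBy, hT t ts rfl]
  | cons f F ih =>
    have hf : before x f = false := hF f (by simp)
    simp only [List.cons_append, PySem.List.insertBy, hf]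
    simp only [Bool.false_eq_true, if_false]
    rw [ih (fun y hy => hF y (by simp [hy]))]

-- the stable insertion sort on a Bool key is exactly the stable partition
theorem foldl_insertBy_bool {α : Type} (k : α → Bool) :
    ∀ (xs F T : List α), (∀ y ∈ F, k y = false) → (∀ y ∈ T, k y = true) →
      xs.foldl (fun acc x => PySem.List.insertBy (fun a b => decide (k a < k b)) x acc) (F ++ T)
        = (F ++ xs.filter (fun x => !k x)) ++ (T ++ xs.filter k) := by
  intro xs
  induction xs with
  | nil => intro F T _ _; simp
  | cons x xs ih =>
    intro F T hF hT
    by_cases hx : k x = true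
    · have h1 : PySem.List.insertBy (fun a b => decide (k a < k b)) x (F ++ T) = (F ++ T) ++ [x] := by
        apply PySem.List.insertBy_of_forall_not_before
        intro y _; simp [hx, Bool.lt_iff]
      have h2 : (F ++ T) ++ [x] = F ++ (T ++ [x]) := by simp
      simp only [List.foldl_cons, h1, h2]
      rw [ih F (T ++ [x]) hF (by intro y hy; rcases List.mem_append.1 hy with h | h
                                 · exact hT y h
                                 · simp at h; simpa [h] using hx)]
      simp [hx]
    · have hx' : k x = false := by simpa using hx
      have h1 : PySem.List.insertBy (fun a b => decide (k a < k b)) x (F ++ T) = F ++ x :: T := by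
        apply insertBy_split
        · intro y hy; simp [hx', hF y hy]
        · intro t ts hTt; have := hT t (by simp [hTt]); simp [hx', this, Bool.lt_iff]
      have h2 : F ++ x :: T = (F ++ [x]) ++ T := by simp
      simp only [List.foldl_cons, h1, h2]
      rw [ih (F ++ [x]) T (by intro y hy; rcases List.mem_append.1 hy with h | h
                              · exact hF y h
                              · simp at h; simpa [h] using hx') hT]
      simp [hx']

theorem sorted_bool_eq_partition {α : Type} (k : α → Bool) (xs : List α) :
    PySem.List.sorted xs k false = xs.filter (fun x => !k x) ++ xs.filter k := by
  rw [PySem.List.sorted_eq_foldl_insertBy]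
  have := foldl_insertBy_bool k xs [] [] (by simp) (by simp)
  simpa using this

-- A's bucket-building loop is the pair of filters
theorem foldl_buckets {α : Type} (p : α → Prop) [DecidablePred p] :
    ∀ (xs P O : List α),
      xs.foldl (fun (acc : List α × List α) x =>
          if p x then (acc.1 ++ [x], acc.2) else (acc.1, acc.2 ++ [x])) (P, O)
        = (P ++ xs.filter (fun x => decide (p x)), O ++ xs.filter (fun x => !decide (p x))) := by
  intro xs
  induction xs with
  | nil => intro P O; simp
  | cons x xs ih =>
    intro P O
    by_cases hx : p x
    · simp only [List.foldl_cons, if_pos hx]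
      rw [ih]
      simp [hx]
    · simp only [List.foldl_cons, if_neg hx]
      rw [ih]
      simp [hx]

-- ===== VERDICT (by name: the statement is the Claim_ definition above) =====
theorem sources_with_primary_first_py_spec : Claim_equal_sources_with_primary_first_py := by
  intro sources primary_source _
  unfold Spec_sources_with_primary_first_py
  unfold sources_with_primary_first_py sources_with_primary_first_py_alt
  by_cases hpt : table_name_py primary_source = ""
  · simp [hpt]
  · simp only [hpt, if_false]
    rw [foldl_buckets (fun s => table_name_py s = table_name_py primary_source) sources [] []]
    rw [sorted_bool_eq_partition (fun s => decide (table_name_py s ≠ table_name_py primary_source)) sources]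
    simp only [List.nil_append, decide_not, Bool.not_not]
    by_cases hP : sources.filter (fun x => decide (table_name_py x = table_name_py primary_source)) = []
    · have hall : ∀ x ∈ sources, ¬ (table_name_py x = table_name_py primary_source) := by
        intro x hx
        have := List.filter_eq_nil_iff.1 hP x hx
        simpa using this
      have hO : sources.filter (fun x => !decide (table_name_py x = table_name_py primary_source)) = sources := by
        apply List.filter_eq_self.2
        intro x hx; simp [hall x hx]
      simp [hP, hO]
    · simp [hP]
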